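-- pv_equiv track=rewrite | github.com/racai-ai/ro-wordpiece-tokenizer | rodna/tokenizer.py | _glue_tokens
-- ===== SOURCE A (Python) =====
-- def _glue_tokens(tokens: list[tuple], do_mwes: bool = False) -> list[tuple]:
--     """Glues some tokens such as abbreviations or MWEs in single tokens, for downstream processing.
--     If `do_mwes is True`, multiword expressions are also glued. """
--
--     glued_tokens = []
--     expr_tokens = []
--     expr_label = ''
--
--     for token, tlabel in tokens:
--         if tlabel == 'ABBR' or (do_mwes and tlabel == 'MWE'):
--             expr_tokens.append(token)
--             expr_label = tlabel
--         else:
--             if expr_tokens: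
--                 expr_token = ''.join(expr_tokens)
--                 expr_token = expr_token.replace(' ', '_')
--                 glued_tokens.append((expr_token, expr_label))
--                 expr_tokens = []
--                 expr_label = ''
--             # end if
--
--             if (tlabel == 'PUNCT' or tlabel == 'SYM') and \
--                     len(token) > 1:
--                 glued_tokens.extend([(pstk, tlabel) for pstk in token])
--             else:
--                 glued_tokens.append((token, tlabel))
--             # end if
--         # end if
--     # end for
--
--     if expr_tokens:
--         expr_token = ''.join(expr_tokens)
--         expr_token = expr_token.replace(' ', '_')
--         glued_tokens.append((expr_token, expr_label))
--     # end if
--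
--     return glued_tokens
-- ===== SOURCE B (Python) =====
-- from itertools import groupby
--
-- def _glue_tokens(tokens: list, do_mwes: bool = False) -> list:
--     out = []
--     for gluable, grp in groupby(
--             tokens,
--             key=lambda pair: pair[1] == 'ABBR' or (do_mwes and pair[1] == 'MWE')):
--         grp = list(grp)
--         if gluable:
--             glued = ''.join(tok for tok, _ in grp).replace(' ', '_')
--             out.append((glued, grp[-1][1]))
--         else:
--             for token, tlabel in grp:
--                 if tlabel in ('PUNCT', 'SYM') and len(token) > 1:
--                     out.extend((ch, tlabel) for ch in token)
--                 else:
--                     out.append((token, tlabel))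
--     return out
-- ===== Notes on version B (the rewrite author's own statement) =====
-- stated objective: idiomatic
-- what changed: Replaces A's stateful accumulator loop (expr_tokens/expr_label carried across iterations with flush points) by itertools.groupby on the gluable-predicate: each maximal run is materialized and emitted in one step, with the run's last label as the glued label.
import Mathlib
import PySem

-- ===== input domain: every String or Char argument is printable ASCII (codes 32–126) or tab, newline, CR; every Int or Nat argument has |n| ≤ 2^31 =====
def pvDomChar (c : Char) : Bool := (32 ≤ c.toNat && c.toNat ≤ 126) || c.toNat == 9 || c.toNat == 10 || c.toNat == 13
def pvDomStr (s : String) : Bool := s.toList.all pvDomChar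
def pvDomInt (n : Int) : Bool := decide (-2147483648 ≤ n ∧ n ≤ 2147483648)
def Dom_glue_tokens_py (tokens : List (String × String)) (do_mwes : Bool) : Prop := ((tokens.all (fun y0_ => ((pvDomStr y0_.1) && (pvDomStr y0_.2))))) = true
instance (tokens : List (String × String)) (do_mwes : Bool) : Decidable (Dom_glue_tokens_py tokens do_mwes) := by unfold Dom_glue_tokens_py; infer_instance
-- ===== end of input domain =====

-- B replaces A's cross-iteration accumulator state by grouping maximal gluable runs (groupby); same output, idiomatic.

-- ''.join(toks).replace(' ', '_') — the glue operation both Pythons perform verbatim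
def pvGlueStr (toks : List String) : String :=
  PySem.Str.replace (PySem.Str.join "" toks) " " "_"

-- ===== PORT A =====
-- the non-gluable arm of A's loop body: char-split a long PUNCT/SYM token, else append as-is
def glueStepA (token tlabel : String) (glued : List (String × String)) : List (String × String) :=
  if (tlabel == "PUNCT" || tlabel == "SYM") = true ∧ PySem.Str.len token > 1
  then glued ++ token.toList.map (fun c => (String.ofList [c], tlabel))
  else glued ++ [(token, tlabel)]

-- A's for-loop as structural recursion over the state (glued_tokens, expr_tokens, expr_label),
-- with the trailing `if expr_tokens:` flush in the nil case
def glueA (do_mwes : Bool) : List (String × String) → List (String × String) → List String → String → List (String × String)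
  | [], glued, etoks, elabel =>
      if etoks ≠ [] then glued ++ [(pvGlueStr etoks, elabel)] else glued
  | (token, tlabel) :: rest, glued, etoks, elabel =>
      if (tlabel == "ABBR" || (do_mwes && tlabel == "MWE")) = true then
        glueA do_mwes rest glued (etoks ++ [token]) tlabel
      else if etoks ≠ [] then
        glueA do_mwes rest (glueStepA token tlabel (glued ++ [(pvGlueStr etoks, elabel)])) [] ""
      else
        glueA do_mwes rest (glueStepA token tlabel glued) etoks elabel

def glue_tokens_py (tokens : List (String × String)) (do_mwes : Bool) : List (String × String) :=
  glueA do_mwes tokens [] [] ""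

-- ===== PORT B =====
-- the groupby key of Source B
def pvGluable (do_mwes : Bool) (tlabel : String) : Bool :=
  tlabel == "ABBR" || (do_mwes && tlabel == "MWE")

-- the non-gluable branch of Source B: char-split long PUNCT/SYM, else keep the token
def pvSplitTok (token tlabel : String) : List (String × String) :=
  if (tlabel == "PUNCT" || tlabel == "SYM") = true ∧ PySem.Str.len token > 1
  then token.toList.map (fun c => (String.ofList [c], tlabel))
  else [(token, tlabel)]

-- Source B: each maximal gluable run (a groupby group, materialized here via takeWhile/dropWhile)
-- becomes one tuple labelled by the run's last label (grp[-1][1])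
def glue_tokens_py_alt (tokens : List (String × String)) (do_mwes : Bool) : List (String × String) :=
  match tokens with
  | [] => []
  | (token, tlabel) :: rest =>
      if pvGluable do_mwes tlabel then
        let pre := rest.takeWhile (fun pr => pvGluable do_mwes pr.2)
        (pvGlueStr (token :: pre.map Prod.fst), (pre.getLastD (token, tlabel)).2)
          :: glue_tokens_py_alt (rest.dropWhile (fun pr => pvGluable do_mwes pr.2)) do_mwes
      else
        pvSplitTok token tlabel ++ glue_tokens_py_alt rest do_mwes
termination_by tokens.length
decreasing_by
  · exact Nat.lt_succ_of_le (List.length_dropWhile_le _ _)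
  · simp

-- ===== PRECONDITION & SPEC =====
def Spec_glue_tokens_py (tokens : List (String × String)) (do_mwes : Bool) (out : List (String × String)) : Prop := out = glue_tokens_py_alt tokens do_mwes
instance (tokens : List (String × String)) (do_mwes : Bool) (out : List (String × String)) : Decidable (Spec_glue_tokens_py tokens do_mwes out) := by unfold Spec_glue_tokens_py; infer_instance

-- ===== CLAIM (what is proved, stated in full; the proofs are below) =====
def Claim_equal_glue_tokens_py : Prop := ∀ (tokens : List (String × String)) (do_mwes : Bool), Dom_glue_tokens_py tokens do_mwes → Spec_glue_tokens_py tokens do_mwes (glue_tokens_py tokens do_mwes)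

-- ===== LEMMAS AND PROOFS =====

-- the two split helpers agree modulo the accumulator
theorem glueStepA_eq (token tlabel : String) (glued : List (String × String)) :
    glueStepA token tlabel glued = glued ++ pvSplitTok token tlabel := by
  unfold glueStepA pvSplitTok
  split_ifs <;> rfl

-- unfolding lemmas for the well-founded recursion of the B port
theorem alt_nil (do_mwes : Bool) : glue_tokens_py_alt [] do_mwes = [] := by
  rw [glue_tokens_py_alt]

theorem alt_cons_glu (do_mwes : Bool) (token tlabel : String) (rest : List (String × String))
    (h : pvGluable do_mwes tlabel = true) :
    glue_tokens_py_alt ((token, tlabel) :: rest) do_mwes =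
      (pvGlueStr (token :: (rest.takeWhile (fun pr => pvGluable do_mwes pr.2)).map Prod.fst),
        ((rest.takeWhile (fun pr => pvGluable do_mwes pr.2)).getLastD (token, tlabel)).2)
        :: glue_tokens_py_alt (rest.dropWhile (fun pr => pvGluable do_mwes pr.2)) do_mwes := by
  rw [glue_tokens_py_alt]
  simp [h]

theorem alt_cons_not (do_mwes : Bool) (token tlabel : String) (rest : List (String × String))
    (h : pvGluable do_mwes tlabel = false) :
    glue_tokens_py_alt ((token, tlabel) :: rest) do_mwes =
      pvSplitTok token tlabel ++ glue_tokens_py_alt rest do_mwes := by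
  rw [glue_tokens_py_alt]
  simp [h]

-- the accumulator glued_tokens only ever receives appends: it factors out
theorem glueA_acc (do_mwes : Bool) (ts : List (String × String)) :
    ∀ (glued : List (String × String)) (etoks : List String) (elabel : String),
    glueA do_mwes ts glued etoks elabel = glued ++ glueA do_mwes ts [] etoks elabel := by
  induction ts with
  | nil =>
      intro glued etoks elabel
      by_cases h : etoks ≠ [] <;> simp [glueA, h]
  | cons hd tl ih =>
      intro glued etoks elabel
      obtain ⟨token, tlabel⟩ := hd
      simp only [glueA]
      by_cases hg : (tlabel == "ABBR" || (do_mwes && tlabel == "MWE")) = true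
      · rw [if_pos hg, if_pos hg, ih]
      · rw [if_neg hg, if_neg hg]
        by_cases he : etoks ≠ []
        · rw [if_pos he, if_pos he, glueStepA_eq, glueStepA_eq]
          conv_lhs => rw [ih]
          conv_rhs => rw [ih]
          simp [List.append_assoc]
        · rw [if_neg he, if_neg he, glueStepA_eq, glueStepA_eq]
          conv_lhs => rw [ih]
          conv_rhs => rw [ih]
          simp [List.append_assoc]

-- processing a run of gluable tokens just accumulates their tokens, keeping the last label
theorem glueA_run (do_mwes : Bool) (pre : List (String × String))
    (hpre : ∀ pr ∈ pre, pvGluable do_mwes pr.2 = true) :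
    ∀ (rest : List (String × String)) (etoks : List String) (elabel : String),
    glueA do_mwes (pre ++ rest) [] etoks elabel =
      glueA do_mwes rest [] (etoks ++ pre.map Prod.fst) ((pre.map Prod.snd).getLastD elabel) := by
  induction pre with
  | nil => intro rest etoks elabel; simp
  | cons hd tl ih =>
      intro rest etoks elabel
      obtain ⟨token, tlabel⟩ := hd
      have hg : (tlabel == "ABBR" || (do_mwes && tlabel == "MWE")) = true := by
        have := hpre (token, tlabel) (by simp)
        simpa [pvGluable] using this
      simp only [List.cons_append, glueA]
      rw [if_pos hg, ih (fun pr h => hpre pr (by simp [h]))]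
      simp only [List.map_cons, List.getLastD_cons, List.append_assoc, List.cons_append,
        List.nil_append]

-- at a flush point (end of input or a non-gluable head) the pending run is emitted first
theorem glueA_flush (do_mwes : Bool) (rest : List (String × String)) (etoks : List String)
    (elabel : String) (hne : etoks ≠ [])
    (hhd : rest = [] ∨ ∃ t l r, rest = (t, l) :: r ∧ pvGluable do_mwes l = false) :
    glueA do_mwes rest [] etoks elabel =
      (pvGlueStr etoks, elabel) :: glueA do_mwes rest [] [] "" := by
  rcases hhd with h | ⟨t, l, r, rfl, hl⟩
  · subst h; simp [glueA, hne]
  · have hg : ¬ ((l == "ABBR" || (do_mwes && l == "MWE")) = true) := by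
      simp only [pvGluable] at hl; simp [hl]
    simp only [glueA]
    rw [if_neg hg, if_neg hg, if_pos hne, if_neg (by simp : ¬ (([] : List String) ≠ []))]
    rw [glueStepA_eq, glueStepA_eq]
    conv_lhs => rw [glueA_acc]
    conv_rhs => rw [glueA_acc]
    simp

-- label of grp[-1] equals the getLastD of the labels
theorem getLastD_snd (pre : List (String × String)) (t l : String) :
    ((pre.getLastD (t, l)).2) = (pre.map Prod.snd).getLastD l := by
  induction pre generalizing t l with
  | nil => rfl
  | cons hd tl ih => simp only [List.getLastD_cons, List.map_cons, ih hd.1 hd.2]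

theorem glueA_eq_alt (do_mwes : Bool) :
    ∀ (n : Nat) (ts : List (String × String)), ts.length ≤ n →
    glueA do_mwes ts [] [] "" = glue_tokens_py_alt ts do_mwes := by
  intro n
  induction n with
  | zero =>
      intro ts h
      have : ts = [] := List.length_eq_zero_iff.mp (Nat.le_zero.mp h)
      subst this
      simp [glueA, alt_nil]
  | succ n ih =>
      intro ts h
      match ts with
      | [] => simp [glueA, alt_nil]
      | (token, tlabel) :: rest =>
        by_cases hg : pvGluable do_mwes tlabel = true
        · have hg' : (tlabel == "ABBR" || (do_mwes && tlabel == "MWE")) = true := by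
            simpa [pvGluable] using hg
          rw [alt_cons_glu do_mwes token tlabel rest hg]
          set pre := rest.takeWhile (fun pr => pvGluable do_mwes pr.2) with hpre
          set suf := rest.dropWhile (fun pr => pvGluable do_mwes pr.2) with hsuf
          have hsplit : rest = pre ++ suf := (List.takeWhile_append_dropWhile).symm
          have hall : ∀ pr ∈ pre, pvGluable do_mwes pr.2 = true := by
            intro pr hm
            rw [hpre] at hm
            exact List.mem_takeWhile_imp (p := fun pr : String × String => pvGluable do_mwes pr.2) hm
          have hstep : glueA do_mwes ((token, tlabel) :: rest) [] [] "" =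
              glueA do_mwes (pre ++ suf) [] [token] tlabel := by
            simp only [glueA]
            rw [if_pos hg', ← hsplit]
            rfl
          rw [hstep, glueA_run do_mwes pre hall suf [token] tlabel]
          have hhd : suf = [] ∨ ∃ t l r, suf = (t, l) :: r ∧ pvGluable do_mwes l = false := by
            rcases hs : suf with _ | ⟨⟨t, l⟩, r⟩
            · exact Or.inl rfl
            · refine Or.inr ⟨t, l, r, rfl, ?_⟩
              have hne : rest.dropWhile (fun pr => pvGluable do_mwes pr.2) ≠ [] := by
                rw [← hsuf, hs]; simp
              have hd : rest.dropWhile (fun pr : String × String => pvGluable do_mwes pr.2)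
                  = (t, l) :: r := by rw [← hsuf, hs]
              have := List.head_dropWhile_not (fun pr : String × String => pvGluable do_mwes pr.2) hne
              simp only [hd] at this
              simpa using this
          rw [glueA_flush do_mwes suf ([token] ++ pre.map Prod.fst) _ (by simp) hhd]
          have hlen : suf.length ≤ n := by
            have h1 : suf.length ≤ rest.length := by
              rw [hsuf]; exact List.length_dropWhile_le _ _
            have h2 : rest.length + 1 ≤ n + 1 := by simpa using h
            omega
          rw [ih suf hlen, getLastD_snd pre token tlabel]
          rfl
        · have hg' : ¬ ((tlabel == "ABBR" || (do_mwes && tlabel == "MWE")) = true) := by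
            simp only [pvGluable] at hg; simpa using hg
          have hgf : pvGluable do_mwes tlabel = false := by
            simpa using hg
          have hlen : rest.length ≤ n := by simpa using h
          rw [alt_cons_not do_mwes token tlabel rest hgf]
          simp only [glueA]
          rw [if_neg hg', if_neg (by simp : ¬ (([] : List String) ≠ []))]
          rw [glueStepA_eq, glueA_acc, ih rest hlen]
          simp

-- ===== VERDICT (by name: the statement is the Claim_ definition above) =====
theorem glue_tokens_py_spec : Claim_equal_glue_tokens_py := by
  intro tokens do_mwes _
  unfold Spec_glue_tokens_py glue_tokens_py
  exact glueA_eq_alt do_mwes tokens.length tokens (Nat.le_refl _)
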